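-- pv_equiv track=rewrite | github.com/revotu/dev-crawler | avarsha/avarsha/spiders/lastcall.py | __build_str
-- ===== SOURCE A (Python) =====
-- def __build_str(url):
--     arg1 = ('{"GenericSearchReq":{"pageOffset":0'
--         ',"pageSize":"30","refinements":"')
--     arg2 = '","sort":"PCS_SORT",'
--     arg2_new = '"endecaDrivenSiloRefinements":"fromDrawer=true",'
--     arg2_0 = '"definitionPath":"'
--     arg3 = ('","userConstrainedResults":"true",'
--         '"advancedFilterReqItems":{"StoreLocationFilterReq":[{')
--     arg4 = '"locationInput":"'
--     arg5 = '"radiusInput":"'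
--     arg10 = '",'
--     arg6 = '"allStoresInput":"'
--     arg7 = '","onlineOnly":"'
--     arg8 = '"}]},"categoryId":"'
--     arg9 = '","sortByFavorites":false,"isFeaturedSort":false,\
--         "prevSort":""}}'
--     __url = url.split('#')
--     __var = __url[1].split('&')
--     refinements = ''
--     endecaDrivenSiloRefinements = ''
--     definitionPath = ''
--     locationInput = ''
--     radiusInput = ''
--     allStoresInput = ''
--     onlineOnly = ''
--     for line in __var:
--         __var_temp = line.split('=')
--         if(__var_temp[0] == 'refinements'):
--             refinements = __var_temp[1]
--         elif(__var_temp[0] == 'endecaDrivenSiloRefinements'):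
--             endecaDrivenSiloRefinements = __var_temp[1]
--         elif(__var_temp[0] == 'definitionPath'):
--             definitionPath = __var_temp[1]
--         elif(__var_temp[0] == 'locationInput'):
--             locationInput = __var_temp[1].replace('+', '')
--         elif(__var_temp[0] == 'radiusInput'):
--             radiusInput = __var_temp[1]
--         elif(__var_temp[0] == 'allStoresInput'):
--             allStoresInput = __var_temp[1]
--         elif(__var_temp[0] == 'onlineOnly'):
--             onlineOnly = __var_temp[1]
--     __url = url.split('/c.cat')
--     idx1 = __url[0].rfind('/')
--     idx2 = __url[0].find('_cat')
--     categoryId = __url[0][idx1 + 1:idx2]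
--     __str = ''
--     if(endecaDrivenSiloRefinements != ''):
--         if(locationInput != '' and radiusInput != ''):
--             __str = ''.join([arg1, str(refinements), arg2, arg2_new, arg2_0,
--                 str(definitionPath), arg3, arg4, str(locationInput), arg10,
--                 arg5, str(radiusInput), arg10, arg6, str(allStoresInput),
--                 arg7, str(onlineOnly), arg8, str(categoryId), arg9])
--         else:
--             __str = ''.join([arg1, str(refinements), arg2, arg2_new, arg2_0,
--                 str(definitionPath), arg3, arg6, str(allStoresInput),
--                 arg7, str(onlineOnly), arg8, str(categoryId), arg9])
--     else:
--         if(locationInput != '' and radiusInput != ''):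
--             __str = ''.join([arg1, str(refinements), arg2, arg2_0,
--                 str(definitionPath), arg3, arg4, str(locationInput), arg10,
--                 arg5, str(radiusInput), arg10, arg6, str(allStoresInput),
--                 arg7, str(onlineOnly), arg8, str(categoryId), arg9])
--         else:
--             __str = ''.join([arg1, str(refinements), arg2, arg2_0,
--                 str(definitionPath), arg3, arg6, str(allStoresInput),
--                 arg7, str(onlineOnly), arg8, str(categoryId), arg9])
--     return __str
-- ===== SOURCE B (Python) =====
-- def _last_param(segments, key):
--     # Scan the '&'-segments from the end; the last assignment to `key` wins.
--     for line in reversed(segments):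
--         fields = line.split('=')
--         if fields[0] == key and len(fields) > 1:
--             return fields[1]
--     return ''
--
--
-- def __build_str(url):
--     arg1 = ('{"GenericSearchReq":{"pageOffset":0'
--         ',"pageSize":"30","refinements":"')
--     arg2 = '","sort":"PCS_SORT",'
--     arg2_new = '"endecaDrivenSiloRefinements":"fromDrawer=true",'
--     arg2_0 = '"definitionPath":"'
--     arg3 = ('","userConstrainedResults":"true",'
--         '"advancedFilterReqItems":{"StoreLocationFilterReq":[{')
--     arg4 = '"locationInput":"'
--     arg5 = '"radiusInput":"'
--     arg10 = '",'
--     arg6 = '"allStoresInput":"'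
--     arg7 = '","onlineOnly":"'
--     arg8 = '"}]},"categoryId":"'
--     arg9 = '","sortByFavorites":false,"isFeaturedSort":false,\
--         "prevSort":""}}'
--     segments = url.split('#')[1].split('&')
--     refinements = _last_param(segments, 'refinements')
--     endecaDrivenSiloRefinements = _last_param(segments, 'endecaDrivenSiloRefinements')
--     definitionPath = _last_param(segments, 'definitionPath')
--     locationInput = _last_param(segments, 'locationInput').replace('+', '')
--     radiusInput = _last_param(segments, 'radiusInput')
--     allStoresInput = _last_param(segments, 'allStoresInput')
--     onlineOnly = _last_param(segments, 'onlineOnly')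
--     prefix = url.split('/c.cat')[0]
--     categoryId = prefix[prefix.rfind('/') + 1:prefix.find('_cat')]
--     opt_endeca = arg2_new if endecaDrivenSiloRefinements != '' else ''
--     opt_store = (arg4 + locationInput + arg10 + arg5 + radiusInput + arg10
--                  if locationInput != '' and radiusInput != '' else '')
--     return (arg1 + refinements + arg2 + opt_endeca + arg2_0 + definitionPath
--             + arg3 + opt_store + arg6 + allStoresInput + arg7 + onlineOnly
--             + arg8 + categoryId + arg9)
-- ===== Notes on version B (the rewrite author's own statement) =====
-- stated objective: alternative
-- what changed: A fills seven variables in one forward accumulation pass over the '&'-segments and enumerates four whole-string joins; B instead resolves each parameter by an independent reverse scan (first match from the end = last assignment wins) and assembles the result once from two precomputed optional middle segments.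
import Mathlib
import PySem

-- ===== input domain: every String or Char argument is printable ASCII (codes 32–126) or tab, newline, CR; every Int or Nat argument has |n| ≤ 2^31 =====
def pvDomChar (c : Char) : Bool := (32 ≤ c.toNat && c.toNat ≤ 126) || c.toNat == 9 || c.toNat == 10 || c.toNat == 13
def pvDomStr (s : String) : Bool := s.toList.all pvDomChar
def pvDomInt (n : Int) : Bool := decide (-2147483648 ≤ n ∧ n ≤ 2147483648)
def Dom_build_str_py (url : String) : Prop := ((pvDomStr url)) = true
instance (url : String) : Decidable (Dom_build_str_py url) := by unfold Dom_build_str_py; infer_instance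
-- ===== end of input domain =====

-- B replaces A's single forward accumulation loop by seven independent reverse scans
-- (last assignment wins = first match from the end), and A's four enumerated whole-string
-- joins by one concatenation with two precomputed optional segments (objective: simpler).

-- ===== PORT A =====
-- A's parameter loop body: state = (refinements, endeca, definitionPath, locationInput, radiusInput, allStores, onlineOnly)
def aStep (st : String × String × String × String × String × String × String) (line : String) :
    String × String × String × String × String × String × String :=
  let t := (PySem.Str.split? line "=").getD []
  let k := PySem.List.pyGetD t 0 ""
  if k == "refinements" then
    (PySem.List.pyGetD t 1 "", st.2.1, st.2.2.1, st.2.2.2.1, st.2.2.2.2.1, st.2.2.2.2.2.1, st.2.2.2.2.2.2)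
  else if k == "endecaDrivenSiloRefinements" then
    (st.1, PySem.List.pyGetD t 1 "", st.2.2.1, st.2.2.2.1, st.2.2.2.2.1, st.2.2.2.2.2.1, st.2.2.2.2.2.2)
  else if k == "definitionPath" then
    (st.1, st.2.1, PySem.List.pyGetD t 1 "", st.2.2.2.1, st.2.2.2.2.1, st.2.2.2.2.2.1, st.2.2.2.2.2.2)
  else if k == "locationInput" then
    (st.1, st.2.1, st.2.2.1, PySem.Str.replace (PySem.List.pyGetD t 1 "") "+" "", st.2.2.2.2.1, st.2.2.2.2.2.1, st.2.2.2.2.2.2)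
  else if k == "radiusInput" then
    (st.1, st.2.1, st.2.2.1, st.2.2.2.1, PySem.List.pyGetD t 1 "", st.2.2.2.2.2.1, st.2.2.2.2.2.2)
  else if k == "allStoresInput" then
    (st.1, st.2.1, st.2.2.1, st.2.2.2.1, st.2.2.2.2.1, PySem.List.pyGetD t 1 "", st.2.2.2.2.2.2)
  else if k == "onlineOnly" then
    (st.1, st.2.1, st.2.2.1, st.2.2.2.1, st.2.2.2.2.1, st.2.2.2.2.2.1, PySem.List.pyGetD t 1 "")
  else st

def build_str_py (url : String) : String :=
  let arg1 := "{\"GenericSearchReq\":{\"pageOffset\":0,\"pageSize\":\"30\",\"refinements\":\""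
  let arg2 := "\",\"sort\":\"PCS_SORT\","
  let arg2_new := "\"endecaDrivenSiloRefinements\":\"fromDrawer=true\","
  let arg2_0 := "\"definitionPath\":\""
  let arg3 := "\",\"userConstrainedResults\":\"true\",\"advancedFilterReqItems\":{\"StoreLocationFilterReq\":[{"
  let arg4 := "\"locationInput\":\""
  let arg5 := "\"radiusInput\":\""
  let arg10 := "\","
  let arg6 := "\"allStoresInput\":\""
  let arg7 := "\",\"onlineOnly\":\""
  let arg8 := "\"}]},\"categoryId\":\""
  let arg9 := "\",\"sortByFavorites\":false,\"isFeaturedSort\":false,        \"prevSort\":\"\"}}"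
  let url1 := (PySem.Str.split? url "#").getD []
  let var := (PySem.Str.split? (PySem.List.pyGetD url1 1 "") "&").getD []
  let st := var.foldl aStep ("", "", "", "", "", "", "")
  let refinements := st.1
  let endecaDrivenSiloRefinements := st.2.1
  let definitionPath := st.2.2.1
  let locationInput := st.2.2.2.1
  let radiusInput := st.2.2.2.2.1
  let allStoresInput := st.2.2.2.2.2.1
  let onlineOnly := st.2.2.2.2.2.2
  let url2 := (PySem.Str.split? url "/c.cat").getD []
  let u0 := PySem.List.pyGetD url2 0 ""
  let idx1 := PySem.Str.rfind u0 "/"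
  let idx2 := PySem.Str.find u0 "_cat"
  let categoryId := PySem.Str.slice u0 (some (idx1 + 1)) (some idx2)
  if endecaDrivenSiloRefinements != "" then
    if locationInput != "" && radiusInput != "" then
      PySem.Str.join "" [arg1, refinements, arg2, arg2_new, arg2_0, definitionPath, arg3, arg4,
        locationInput, arg10, arg5, radiusInput, arg10, arg6, allStoresInput, arg7, onlineOnly,
        arg8, categoryId, arg9]
    else
      PySem.Str.join "" [arg1, refinements, arg2, arg2_new, arg2_0, definitionPath, arg3, arg6,
        allStoresInput, arg7, onlineOnly, arg8, categoryId, arg9]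
  else
    if locationInput != "" && radiusInput != "" then
      PySem.Str.join "" [arg1, refinements, arg2, arg2_0, definitionPath, arg3, arg4,
        locationInput, arg10, arg5, radiusInput, arg10, arg6, allStoresInput, arg7, onlineOnly,
        arg8, categoryId, arg9]
    else
      PySem.Str.join "" [arg1, refinements, arg2, arg2_0, definitionPath, arg3, arg6,
        allStoresInput, arg7, onlineOnly, arg8, categoryId, arg9]

-- ===== PORT B =====
-- B's `_last_param`: scan the segments from the end, return the first assignment to `key`.
def bLastGo (segs : List String) (key : String) : String :=
  match segs with
  | [] => ""
  | line :: rest =>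
    let fields := (PySem.Str.split? line "=").getD []
    if PySem.List.pyGetD fields 0 "" == key && fields.length > 1 then
      PySem.List.pyGetD fields 1 ""
    else bLastGo rest key

def bLastParam (segs : List String) (key : String) : String := bLastGo segs.reverse key

def build_str_py_alt (url : String) : String :=
  let arg1 := "{\"GenericSearchReq\":{\"pageOffset\":0,\"pageSize\":\"30\",\"refinements\":\""
  let arg2 := "\",\"sort\":\"PCS_SORT\","
  let arg2_new := "\"endecaDrivenSiloRefinements\":\"fromDrawer=true\","
  let arg2_0 := "\"definitionPath\":\""
  let arg3 := "\",\"userConstrainedResults\":\"true\",\"advancedFilterReqItems\":{\"StoreLocationFilterReq\":[{"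
  let arg4 := "\"locationInput\":\""
  let arg5 := "\"radiusInput\":\""
  let arg10 := "\","
  let arg6 := "\"allStoresInput\":\""
  let arg7 := "\",\"onlineOnly\":\""
  let arg8 := "\"}]},\"categoryId\":\""
  let arg9 := "\",\"sortByFavorites\":false,\"isFeaturedSort\":false,        \"prevSort\":\"\"}}"
  let segments := (PySem.Str.split? (PySem.List.pyGetD ((PySem.Str.split? url "#").getD []) 1 "") "&").getD []
  let refinements := bLastParam segments "refinements"
  let endecaDrivenSiloRefinements := bLastParam segments "endecaDrivenSiloRefinements"
  let definitionPath := bLastParam segments "definitionPath"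
  let locationInput := PySem.Str.replace (bLastParam segments "locationInput") "+" ""
  let radiusInput := bLastParam segments "radiusInput"
  let allStoresInput := bLastParam segments "allStoresInput"
  let onlineOnly := bLastParam segments "onlineOnly"
  let prefix_ := PySem.List.pyGetD ((PySem.Str.split? url "/c.cat").getD []) 0 ""
  let categoryId := PySem.Str.slice prefix_ (some (PySem.Str.rfind prefix_ "/" + 1)) (some (PySem.Str.find prefix_ "_cat"))
  let opt_endeca := if endecaDrivenSiloRefinements != "" then arg2_new else ""
  let opt_store := if locationInput != "" && radiusInput != "" then
      arg4 ++ locationInput ++ arg10 ++ arg5 ++ radiusInput ++ arg10 else ""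
  arg1 ++ refinements ++ arg2 ++ opt_endeca ++ arg2_0 ++ definitionPath
    ++ arg3 ++ opt_store ++ arg6 ++ allStoresInput ++ arg7 ++ onlineOnly
    ++ arg8 ++ categoryId ++ arg9

-- ===== PRECONDITION & SPEC =====
def pvKeys : List String :=
  ["refinements", "endecaDrivenSiloRefinements", "definitionPath", "locationInput",
   "radiusInput", "allStoresInput", "onlineOnly"]

-- Pre_ excludes exactly the inputs on which A raises IndexError: urls without '#', and urls whose
-- fragment has a '&'-segment that is exactly one of the seven parameter names with no '=' after it.
def Pre_build_str_py (url : String) : Prop :=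
  PySem.Str.isIn "#" url = true ∧
  ∀ line ∈ (PySem.Str.split? (PySem.List.pyGetD ((PySem.Str.split? url "#").getD []) 1 "") "&").getD [],
    line ∉ pvKeys
instance (url : String) : Decidable (Pre_build_str_py url) := by unfold Pre_build_str_py; infer_instance

def pvWitness_build_str_py : String := "https://x/1_cat2/c.cat#refinements=a&locationInput=N+Y&radiusInput=10"

def Spec_build_str_py (url : String) (out : String) : Prop := out = build_str_py_alt url
instance (url : String) (out : String) : Decidable (Spec_build_str_py url out) := by unfold Spec_build_str_py; infer_instance

-- ===== CLAIM (what is proved, stated in full; the proofs are below) =====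
def Claim_equal_build_str_py : Prop := ∀ (url : String), Dom_build_str_py url → Pre_build_str_py url → Spec_build_str_py url (build_str_py url)

-- ===== LEMMAS AND PROOFS =====

theorem go_len_ge (sep : List Char) (fuel : Nat) (l cur : List Char) (acc : List (List Char)) :
    acc.length + 1 ≤ (PySem.Chars.splitOn.go sep fuel l cur acc).length := by
  induction fuel generalizing l cur acc with
  | zero => simp [PySem.Chars.splitOn.go]
  | succ n ih =>
    cases l with
    | nil => simp [PySem.Chars.splitOn.go]
    | cons c rest =>
      rw [PySem.Chars.splitOn.go]
      split
      · exact le_trans (by simp) (ih _ _ _)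
      · exact ih _ _ _

theorem go_no_sep (sep : List Char) (fuel : Nat) (l cur : List Char) (acc : List (List Char))
    (hf : l.length < fuel) (h : ¬ sep <:+: l) :
    PySem.Chars.splitOn.go sep fuel l cur acc = ((cur.reverse ++ l) :: acc).reverse := by
  induction fuel generalizing l cur acc with
  | zero => omega
  | succ n ih =>
    cases l with
    | nil =>
      rw [PySem.Chars.splitOn.go]
      · simp
      · omega
    | cons c rest =>
      rw [PySem.Chars.splitOn.go]
      have hp : sep.isPrefixOf (c :: rest) = false := by
        by_contra hc
        exact h (List.IsPrefix.isInfix (List.isPrefixOf_iff_prefix.mp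
          (by revert hc; cases sep.isPrefixOf (c :: rest) <;> simp)))
      rw [hp]
      simp only [Bool.false_eq_true, if_false]
      rw [ih rest (c :: cur) acc (by simp at hf ⊢; omega)
        (fun hi => h (hi.trans (List.suffix_cons c rest).isInfix))]
      simp

theorem go_sep_len (sep : List Char) (hsep : sep ≠ []) (fuel : Nat) (l cur : List Char)
    (acc : List (List Char)) (hf : l.length < fuel) (h : sep <:+: l) :
    acc.length + 2 ≤ (PySem.Chars.splitOn.go sep fuel l cur acc).length := by
  induction fuel generalizing l cur acc with
  | zero => omega
  | succ n ih =>
    cases l with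
    | nil => exact absurd (List.eq_nil_of_infix_nil h) hsep
    | cons c rest =>
      rw [PySem.Chars.splitOn.go]
      by_cases hp : sep.isPrefixOf (c :: rest) = true
      · rw [hp]
        simp only [if_true]
        have := go_len_ge sep n (List.drop sep.length (c :: rest)) [] (cur.reverse :: acc)
        simpa using this
      · rw [Bool.eq_false_iff.mpr hp]
        simp only [Bool.false_eq_true, if_false]
        have hrest : sep <:+: rest := by
          rcases List.infix_cons_iff.mp h with hpre | hinf
          · exact absurd (List.isPrefixOf_iff_prefix.mpr hpre) hp
          · exact hinf
        exact ih rest (c :: cur) acc (by simp at hf ⊢; omega) hrest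

theorem splitOn_no_sep (s sep : List Char) (h : ¬ sep <:+: s) :
    PySem.Chars.splitOn s sep = [s] := by
  unfold PySem.Chars.splitOn
  rw [go_no_sep sep (s.length + 1) s [] [] (by omega) h]
  simp

theorem splitOn_sep_len (s sep : List Char) (hsep : sep ≠ []) (h : sep <:+: s) :
    2 ≤ (PySem.Chars.splitOn s sep).length := by
  unfold PySem.Chars.splitOn
  simpa using go_sep_len sep hsep (s.length + 1) s [] [] (by omega) h

-- key and value of one '&'-segment, as both programs read them
def kOf (line : String) : String := PySem.List.pyGetD ((PySem.Str.split? line "=").getD []) 0 ""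
def vOf (line : String) : String := PySem.List.pyGetD ((PySem.Str.split? line "=").getD []) 1 ""

-- option-valued first match, characterising B's reverse scan
def fm? (segs : List String) (key : String) : Option String :=
  match segs with
  | [] => none
  | line :: rest =>
    let fields := (PySem.Str.split? line "=").getD []
    if PySem.List.pyGetD fields 0 "" == key && fields.length > 1 then
      some (PySem.List.pyGetD fields 1 "")
    else fm? rest key

theorem bLastGo_eq_fm (segs : List String) (key : String) :
    bLastGo segs key = (fm? segs key).getD "" := by
  induction segs with
  | nil => rfl
  | cons a as ih =>
    simp only [bLastGo, fm?]
    split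
    · rfl
    · exact ih

theorem fm?_append (xs ys : List String) (key : String) :
    fm? (xs ++ ys) key = (fm? xs key).or (fm? ys key) := by
  induction xs with
  | nil => simp [fm?]
  | cons a as ih =>
    simp only [List.cons_append, fm?]
    split
    · simp
    · exact ih

theorem fm_single (a k : String) (ha : a ∉ pvKeys) (hk : k ∈ pvKeys) :
    fm? [a] k = if kOf a == k then some (vOf a) else none := by
  simp only [fm?, kOf, vOf]
  by_cases hke : PySem.List.pyGetD ((PySem.Str.split? a "=").getD []) 0 "" == k
  · have hlen : 1 < ((PySem.Str.split? a "=").getD []).length := by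
      by_cases hinf : ('=' :: []) <:+: a.toList
      · have : 2 ≤ (PySem.Chars.splitOn a.toList ['=']).length :=
          splitOn_sep_len a.toList ['='] (by simp) hinf
        simp only [PySem.Str.split?, PySem.Chars.split?]
        simpa using this
      · exfalso
        have ht : (PySem.Str.split? a "=").getD [] = [a] := by
          simp only [PySem.Str.split?, PySem.Chars.split?]
          rw [show ("=" : String).toList = ['='] from rfl]
          simp [splitOn_no_sep a.toList ['='] hinf, String.ofList_toList]
        rw [ht] at hke
        simp only [PySem.List.pyGetD_zero_cons, beq_iff_eq] at hke
        exact ha (hke ▸ hk)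
    simp [hke, hlen]
  · simp [Bool.eq_false_iff.mpr hke]

-- aStep written componentwise
theorem aStep_eq (st : String × String × String × String × String × String × String) (a : String) :
    aStep st a =
      ((if kOf a == "refinements" then vOf a else st.1),
       (if kOf a == "endecaDrivenSiloRefinements" then vOf a else st.2.1),
       (if kOf a == "definitionPath" then vOf a else st.2.2.1),
       (if kOf a == "locationInput" then PySem.Str.replace (vOf a) "+" "" else st.2.2.2.1),
       (if kOf a == "radiusInput" then vOf a else st.2.2.2.2.1),
       (if kOf a == "allStoresInput" then vOf a else st.2.2.2.2.2.1),
       (if kOf a == "onlineOnly" then vOf a else st.2.2.2.2.2.2)) := by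
  simp only [aStep, kOf, vOf]
  split_ifs <;> simp_all

-- A's forward accumulation equals B's first-match-from-the-end, componentwise
theorem inv_fold (segs : List String) (d1 d2 d3 d4 d5 d6 d7 : String)
    (hpre : ∀ l ∈ segs, l ∉ pvKeys) :
    segs.foldl aStep (d1, d2, d3, d4, d5, d6, d7) =
      ((fm? segs.reverse "refinements").getD d1,
       (fm? segs.reverse "endecaDrivenSiloRefinements").getD d2,
       (fm? segs.reverse "definitionPath").getD d3,
       ((fm? segs.reverse "locationInput").map (fun v => PySem.Str.replace v "+" "")).getD d4,
       (fm? segs.reverse "radiusInput").getD d5,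
       (fm? segs.reverse "allStoresInput").getD d6,
       (fm? segs.reverse "onlineOnly").getD d7) := by
  induction segs generalizing d1 d2 d3 d4 d5 d6 d7 with
  | nil => simp [fm?]
  | cons a as ih =>
    have ha : a ∉ pvKeys := hpre a List.mem_cons_self
    simp only [List.foldl_cons, List.reverse_cons, fm?_append]
    rw [aStep_eq (d1, d2, d3, d4, d5, d6, d7) a]
    rw [ih _ _ _ _ _ _ _ (fun l hl => hpre l (List.mem_cons_of_mem a hl))]
    have h1 := fm_single a "refinements" ha (by simp [pvKeys])
    have h2 := fm_single a "endecaDrivenSiloRefinements" ha (by simp [pvKeys])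
    have h3 := fm_single a "definitionPath" ha (by simp [pvKeys])
    have h4 := fm_single a "locationInput" ha (by simp [pvKeys])
    have h5 := fm_single a "radiusInput" ha (by simp [pvKeys])
    have h6 := fm_single a "allStoresInput" ha (by simp [pvKeys])
    have h7 := fm_single a "onlineOnly" ha (by simp [pvKeys])
    have or_getD : ∀ (x y : Option String) (d : String), (x.or y).getD d = x.getD (y.getD d) := by
      intro x y d; cases x <;> simp
    have map_or : ∀ (x y : Option String) (f : String → String), (x.or y).map f = (x.map f).or (y.map f) := by
      intro x y f; cases x <;> simp
    refine Prod.ext ?_ (Prod.ext ?_ (Prod.ext ?_ (Prod.ext ?_ (Prod.ext ?_ (Prod.ext ?_ ?_))))) <;>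
      simp only [map_or, or_getD, h1, h2, h3, h4, h5, h6, h7] <;>
      split_ifs <;> simp

theorem join_empty_nil : PySem.Str.join "" [] = "" := rfl

theorem join_empty_cons (a : String) (l : List String) :
    PySem.Str.join "" (a :: l) = a ++ PySem.Str.join "" l := by
  have h : ([] : List Char).intercalate (a.toList :: l.map String.toList)
      = a.toList ++ ([] : List Char).intercalate (l.map String.toList) := by
    simp [List.intercalate]
    cases l <;> simp
  simp [PySem.Str.join, PySem.Chars.join, h, String.ofList_append]

theorem replace_getD (o : Option String) :
    PySem.Str.replace (o.getD "") "+" "" =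
      (o.map (fun v => PySem.Str.replace v "+" "")).getD "" := by
  cases o with
  | none => rfl
  | some v => rfl

theorem assemble (r e dp loc rad all onl cat : String) :
    (if e != "" then
       if loc != "" && rad != "" then
         PySem.Str.join "" ["{\"GenericSearchReq\":{\"pageOffset\":0,\"pageSize\":\"30\",\"refinements\":\"", r, "\",\"sort\":\"PCS_SORT\",", "\"endecaDrivenSiloRefinements\":\"fromDrawer=true\",", "\"definitionPath\":\"", dp, "\",\"userConstrainedResults\":\"true\",\"advancedFilterReqItems\":{\"StoreLocationFilterReq\":[{", "\"locationInput\":\"", loc, "\",", "\"radiusInput\":\"", rad, "\",", "\"allStoresInput\":\"", all, "\",\"onlineOnly\":\"", onl, "\"}]},\"categoryId\":\"", cat, "\",\"sortByFavorites\":false,\"isFeaturedSort\":false,        \"prevSort\":\"\"}}"]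
       else
         PySem.Str.join "" ["{\"GenericSearchReq\":{\"pageOffset\":0,\"pageSize\":\"30\",\"refinements\":\"", r, "\",\"sort\":\"PCS_SORT\",", "\"endecaDrivenSiloRefinements\":\"fromDrawer=true\",", "\"definitionPath\":\"", dp, "\",\"userConstrainedResults\":\"true\",\"advancedFilterReqItems\":{\"StoreLocationFilterReq\":[{", "\"allStoresInput\":\"", all, "\",\"onlineOnly\":\"", onl, "\"}]},\"categoryId\":\"", cat, "\",\"sortByFavorites\":false,\"isFeaturedSort\":false,        \"prevSort\":\"\"}}"]
     else
       if loc != "" && rad != "" then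
         PySem.Str.join "" ["{\"GenericSearchReq\":{\"pageOffset\":0,\"pageSize\":\"30\",\"refinements\":\"", r, "\",\"sort\":\"PCS_SORT\",", "\"definitionPath\":\"", dp, "\",\"userConstrainedResults\":\"true\",\"advancedFilterReqItems\":{\"StoreLocationFilterReq\":[{", "\"locationInput\":\"", loc, "\",", "\"radiusInput\":\"", rad, "\",", "\"allStoresInput\":\"", all, "\",\"onlineOnly\":\"", onl, "\"}]},\"categoryId\":\"", cat, "\",\"sortByFavorites\":false,\"isFeaturedSort\":false,        \"prevSort\":\"\"}}"]
       else
         PySem.Str.join "" ["{\"GenericSearchReq\":{\"pageOffset\":0,\"pageSize\":\"30\",\"refinements\":\"", r, "\",\"sort\":\"PCS_SORT\",", "\"definitionPath\":\"", dp, "\",\"userConstrainedResults\":\"true\",\"advancedFilterReqItems\":{\"StoreLocationFilterReq\":[{", "\"allStoresInput\":\"", all, "\",\"onlineOnly\":\"", onl, "\"}]},\"categoryId\":\"", cat, "\",\"sortByFavorites\":false,\"isFeaturedSort\":false,        \"prevSort\":\"\"}}"]) =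
    "{\"GenericSearchReq\":{\"pageOffset\":0,\"pageSize\":\"30\",\"refinements\":\"" ++ r ++ "\",\"sort\":\"PCS_SORT\"," ++ (if e != "" then "\"endecaDrivenSiloRefinements\":\"fromDrawer=true\"," else "") ++ "\"definitionPath\":\"" ++ dp ++ "\",\"userConstrainedResults\":\"true\",\"advancedFilterReqItems\":{\"StoreLocationFilterReq\":[{" ++
      (if loc != "" && rad != "" then "\"locationInput\":\"" ++ loc ++ "\"," ++ "\"radiusInput\":\"" ++ rad ++ "\"," else "") ++
      "\"allStoresInput\":\"" ++ all ++ "\",\"onlineOnly\":\"" ++ onl ++ "\"}]},\"categoryId\":\"" ++ cat ++ "\",\"sortByFavorites\":false,\"isFeaturedSort\":false,        \"prevSort\":\"\"}}" := by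
  split_ifs <;>
    simp only [join_empty_cons, join_empty_nil, String.append_assoc, String.append_empty]

-- ===== VERDICT (by name: the statement is the Claim_ definition above) =====
-- the whole equivalence, generalized over the parsed segment list and the category prefix
theorem main_gen (segs : List String) (u0 : String) (hpre : ∀ l ∈ segs, l ∉ pvKeys) :
    (let st := segs.foldl aStep ("", "", "", "", "", "", "")
     let categoryId := PySem.Str.slice u0 (some (PySem.Str.rfind u0 "/" + 1)) (some (PySem.Str.find u0 "_cat"))
     if st.2.1 != "" then
       if st.2.2.2.1 != "" && st.2.2.2.2.1 != "" then
         PySem.Str.join "" ["{\"GenericSearchReq\":{\"pageOffset\":0,\"pageSize\":\"30\",\"refinements\":\"", st.1, "\",\"sort\":\"PCS_SORT\",", "\"endecaDrivenSiloRefinements\":\"fromDrawer=true\",", "\"definitionPath\":\"", st.2.2.1, "\",\"userConstrainedResults\":\"true\",\"advancedFilterReqItems\":{\"StoreLocationFilterReq\":[{", "\"locationInput\":\"", st.2.2.2.1, "\",", "\"radiusInput\":\"", st.2.2.2.2.1, "\",", "\"allStoresInput\":\"", st.2.2.2.2.2.1, "\",\"onlineOnly\":\"", st.2.2.2.2.2.2,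 "\"}]},\"categoryId\":\"", categoryId, "\",\"sortByFavorites\":false,\"isFeaturedSort\":false,        \"prevSort\":\"\"}}"]
       else
         PySem.Str.join "" ["{\"GenericSearchReq\":{\"pageOffset\":0,\"pageSize\":\"30\",\"refinements\":\"", st.1, "\",\"sort\":\"PCS_SORT\",", "\"endecaDrivenSiloRefinements\":\"fromDrawer=true\",", "\"definitionPath\":\"", st.2.2.1, "\",\"userConstrainedResults\":\"true\",\"advancedFilterReqItems\":{\"StoreLocationFilterReq\":[{", "\"allStoresInput\":\"", st.2.2.2.2.2.1, "\",\"onlineOnly\":\"", st.2.2.2.2.2.2, "\"}]},\"categoryId\":\"", categoryId, "\",\"sortByFavorites\":false,\"isFeaturedSort\":false,        \"prevSort\":\"\"}}"]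
     else
       if st.2.2.2.1 != "" && st.2.2.2.2.1 != "" then
         PySem.Str.join "" ["{\"GenericSearchReq\":{\"pageOffset\":0,\"pageSize\":\"30\",\"refinements\":\"", st.1, "\",\"sort\":\"PCS_SORT\",", "\"definitionPath\":\"", st.2.2.1, "\",\"userConstrainedResults\":\"true\",\"advancedFilterReqItems\":{\"StoreLocationFilterReq\":[{", "\"locationInput\":\"", st.2.2.2.1, "\",", "\"radiusInput\":\"", st.2.2.2.2.1, "\",", "\"allStoresInput\":\"", st.2.2.2.2.2.1, "\",\"onlineOnly\":\"", st.2.2.2.2.2.2, "\"}]},\"categoryId\":\"", categoryId, "\",\"sortByFavorites\":false,\"isFeaturedSort\":false,        \"prevSort\":\"\"}}"]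
       else
         PySem.Str.join "" ["{\"GenericSearchReq\":{\"pageOffset\":0,\"pageSize\":\"30\",\"refinements\":\"", st.1, "\",\"sort\":\"PCS_SORT\",", "\"definitionPath\":\"", st.2.2.1, "\",\"userConstrainedResults\":\"true\",\"advancedFilterReqItems\":{\"StoreLocationFilterReq\":[{", "\"allStoresInput\":\"", st.2.2.2.2.2.1, "\",\"onlineOnly\":\"", st.2.2.2.2.2.2, "\"}]},\"categoryId\":\"", categoryId, "\",\"sortByFavorites\":false,\"isFeaturedSort\":false,        \"prevSort\":\"\"}}"]) =
    (let refinements := bLastParam segs "refinements"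
     let endecaDrivenSiloRefinements := bLastParam segs "endecaDrivenSiloRefinements"
     let definitionPath := bLastParam segs "definitionPath"
     let locationInput := PySem.Str.replace (bLastParam segs "locationInput") "+" ""
     let radiusInput := bLastParam segs "radiusInput"
     let allStoresInput := bLastParam segs "allStoresInput"
     let onlineOnly := bLastParam segs "onlineOnly"
     let categoryId := PySem.Str.slice u0 (some (PySem.Str.rfind u0 "/" + 1)) (some (PySem.Str.find u0 "_cat"))
     let opt_endeca := if endecaDrivenSiloRefinements != "" then "\"endecaDrivenSiloRefinements\":\"fromDrawer=true\"," else ""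
     let opt_store := if locationInput != "" && radiusInput != "" then
         "\"locationInput\":\"" ++ locationInput ++ "\"," ++ "\"radiusInput\":\"" ++ radiusInput ++ "\"," else ""
     "{\"GenericSearchReq\":{\"pageOffset\":0,\"pageSize\":\"30\",\"refinements\":\"" ++ refinements ++ "\",\"sort\":\"PCS_SORT\"," ++ opt_endeca ++ "\"definitionPath\":\"" ++ definitionPath
       ++ "\",\"userConstrainedResults\":\"true\",\"advancedFilterReqItems\":{\"StoreLocationFilterReq\":[{" ++ opt_store ++ "\"allStoresInput\":\"" ++ allStoresInput ++ "\",\"onlineOnly\":\"" ++ onlineOnly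
       ++ "\"}]},\"categoryId\":\"" ++ categoryId ++ "\",\"sortByFavorites\":false,\"isFeaturedSort\":false,        \"prevSort\":\"\"}}") := by
  simp only [bLastParam, bLastGo_eq_fm]
  rw [inv_fold _ "" "" "" "" "" "" "" hpre]
  simp only []
  rw [replace_getD]
  exact assemble _ _ _ _ _ _ _ _

theorem build_str_py_spec : Claim_equal_build_str_py := by
  intro url _hdom hpre
  obtain ⟨_hh, hlines⟩ := hpre
  exact main_gen
    ((PySem.Str.split? (PySem.List.pyGetD ((PySem.Str.split? url "#").getD []) 1 "") "&").getD [])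
    (PySem.List.pyGetD ((PySem.Str.split? url "/c.cat").getD []) 0 "") hlines
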